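-- pv_equiv track=rewrite | github.com/redam94/atlas-agent | packages/atlas-knowledge/atlas_knowledge/chunking/semantic.py | _paragraph_start_indices
-- ===== SOURCE A (Python) =====
-- def _paragraph_start_indices(text: str) -> list[int]:
--     """Return word indices that begin a new paragraph (post-blank-line)."""
--     starts: list[int] = []
--     word_index = 0
--     in_blank = False
--     for token in text.split("\n"):
--         if token.strip() == "":
--             in_blank = True
--             continue
--         if in_blank:
--             starts.append(word_index)
--             in_blank = False
--         word_index += len(token.split())
--     return starts
-- ===== SOURCE B (Python) =====
-- def _paragraph_start_indices(text: str) -> list[int]: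
--     """Return word indices that begin a new paragraph (post-blank-line)."""
--     lines = text.split("\n")
--     blanks = [line.strip() == "" for line in lines]
--     prefix = [0]
--     for line in lines:
--         prefix.append(prefix[-1] + len(line.split()))
--     return [p for prev, cur, p in zip(blanks, blanks[1:], prefix[1:]) if prev and not cur]
-- ===== Notes on version B (the rewrite author's own statement) =====
-- stated objective: alternative
-- what changed: Replaces the stateful flag-and-accumulator loop by a declarative pipeline: a per-line (is_blank, word_count) table, a prefix-sum list of word counts, and a comprehension over zipped adjacent blank flags selecting blank-to-content transitions.
import Mathlib
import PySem

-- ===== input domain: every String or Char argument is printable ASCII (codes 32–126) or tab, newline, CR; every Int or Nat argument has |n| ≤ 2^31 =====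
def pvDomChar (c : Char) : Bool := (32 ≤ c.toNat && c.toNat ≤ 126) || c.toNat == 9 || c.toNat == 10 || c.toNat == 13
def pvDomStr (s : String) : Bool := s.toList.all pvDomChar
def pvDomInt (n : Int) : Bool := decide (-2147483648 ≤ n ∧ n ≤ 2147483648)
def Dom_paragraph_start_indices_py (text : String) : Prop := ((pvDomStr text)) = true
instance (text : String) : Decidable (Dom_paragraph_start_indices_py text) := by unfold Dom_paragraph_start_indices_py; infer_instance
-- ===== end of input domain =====

-- B recomputes the same paragraph-start word indices via a per-line table, prefix sums and a
-- zip over adjacent blank flags instead of A's stateful flag loop (objective: alternative).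

-- ===== PORT A =====
-- one step of A's for-loop; state = (starts, word_index, in_blank)
def pvStepA (st : List Int × Int × Bool) (token : String) : List Int × Int × Bool :=
  if PySem.Str.strip token = "" then (st.1, st.2.1, true)
  else ((if st.2.2 then st.1 ++ [st.2.1] else st.1),
        st.2.1 + ((PySem.Str.split₀ token).length : Int), false)

def paragraph_start_indices_py (text : String) : List Int :=
  (((PySem.Str.split? text "\n").getD []).foldl pvStepA ([], 0, false)).1

-- ===== PORT B =====
def paragraph_start_indices_py_alt (text : String) : List Int :=
  let lines := (PySem.Str.split? text "\n").getD []
  let blanks := lines.map (fun line => PySem.Str.strip line == "")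
  let pref := lines.foldl
    (fun p line => p ++ [p.getLastD 0 + ((PySem.Str.split₀ line).length : Int)]) [(0 : Int)]
  ((blanks.zip (PySem.List.slice blanks (some 1) none)).zip
      (PySem.List.slice pref (some 1) none)).filterMap
    (fun t => if t.1.1 && !t.1.2 then some t.2 else none)

-- ===== PRECONDITION & SPEC =====
def Spec_paragraph_start_indices_py (text : String) (out : List Int) : Prop := out = paragraph_start_indices_py_alt text
instance (text : String) (out : List Int) : Decidable (Spec_paragraph_start_indices_py text out) := by unfold Spec_paragraph_start_indices_py; infer_instance

-- ===== CLAIM (what is proved, stated in full; the proofs are below) =====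
def Claim_equal_paragraph_start_indices_py : Prop := ∀ (text : String), Dom_paragraph_start_indices_py text → Spec_paragraph_start_indices_py text (paragraph_start_indices_py text)

-- ===== LEMMAS AND PROOFS =====

def pvBlank (l : String) : Bool := PySem.Str.strip l == ""
def pvWc (l : String) : Int := ((PySem.Str.split₀ l).length : Int)

-- common intermediate semantics of both programs
def pvH : Bool → List String → Int → List Int
  | _, [], _ => []
  | prev, l :: ls, wi =>
    (if prev && !pvBlank l then [wi] else []) ++ pvH (pvBlank l) ls (wi + pvWc l)

def pvPref : Int → List String → List Int
  | _, [] => []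
  | w, l :: ls => (w + pvWc l) :: pvPref (w + pvWc l) ls

lemma pv_all_space_of_strip_nil (cs : List Char) (h : PySem.Chars.strip cs = []) :
    ∀ c ∈ cs, PySem.Chars.isspace c = true := by
  unfold PySem.Chars.strip PySem.Chars.rstrip PySem.Chars.lstrip at h
  rw [List.reverse_eq_nil_iff, List.dropWhile_eq_nil_iff] at h
  intro c hc
  by_cases hd : c ∈ List.dropWhile PySem.Chars.isspace cs
  · exact h c (by simpa using hd)
  · have : c ∈ List.takeWhile PySem.Chars.isspace cs := by
      have := List.takeWhile_append_dropWhile (p := PySem.Chars.isspace) (l := cs)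
      rw [← this] at hc
      rcases List.mem_append.mp hc with h1 | h2
      · exact h1
      · exact absurd h2 hd
    exact List.mem_takeWhile_imp this

lemma pv_go_spaces (cs : List Char) (acc : List (List Char))
    (h : ∀ c ∈ cs, PySem.Chars.isspace c = true) :
    PySem.Chars.split₀.go cs [] acc = acc.reverse := by
  induction cs generalizing acc with
  | nil => simp [PySem.Chars.split₀.go]
  | cons c rest ih =>
    have hc : PySem.Chars.isspace c = true := h c (List.mem_cons_self ..)
    simp [PySem.Chars.split₀.go, hc]
    exact ih acc (fun d hd => h d (List.mem_cons_of_mem _ hd))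

lemma pv_wc_of_blank (l : String) (h : pvBlank l = true) : pvWc l = 0 := by
  have hstrip : PySem.Str.strip l = "" := by
    unfold pvBlank at h; exact of_decide_eq_true h
  have hnil : PySem.Chars.strip l.toList = [] := by
    unfold PySem.Str.strip at hstrip
    have := congrArg String.toList hstrip
    simpa using this
  have hall := pv_all_space_of_strip_nil _ hnil
  have : PySem.Chars.split₀ l.toList = [] := by
    unfold PySem.Chars.split₀
    simpa using pv_go_spaces _ [] hall
  unfold pvWc PySem.Str.split₀
  simp [this]

lemma pv_foldA (ls : List String) (starts : List Int) (wi : Int) (inb : Bool) :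
    (ls.foldl pvStepA (starts, wi, inb)).1 = starts ++ pvH inb ls wi := by
  induction ls generalizing starts wi inb with
  | nil => simp [pvH]
  | cons l ls ih =>
    by_cases hb : pvBlank l = true
    · have hs : PySem.Str.strip l = "" := by unfold pvBlank at hb; exact of_decide_eq_true hb
      have hw : pvWc l = 0 := pv_wc_of_blank l hb
      simp only [List.foldl_cons, pvStepA, hs, ih, pvH, hb]
      simp [hw]
    · have hs : ¬ PySem.Str.strip l = "" := by
        intro h; exact hb (by unfold pvBlank; simp [h])
      simp only [List.foldl_cons, pvStepA, if_neg hs, ih, pvH, hb]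
      cases inb <;> simp [pvWc, List.append_assoc]

lemma pv_getLastD_concat (p : List Int) (x : Int) : (p ++ [x]).getLastD 0 = x := by
  simp

lemma pv_foldPref (ls : List String) (p : List Int) (x : Int) :
    ls.foldl (fun p line => p ++ [p.getLastD 0 + ((PySem.Str.split₀ line).length : Int)]) (p ++ [x])
      = (p ++ [x]) ++ pvPref x ls := by
  induction ls generalizing p x with
  | nil => simp [pvPref]
  | cons l ls ih =>
    simp only [List.foldl_cons, pv_getLastD_concat, pvPref]
    rw [List.append_assoc] at *
    have := ih (p ++ [x]) (x + pvWc l)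
    simp only [List.append_assoc] at this ⊢
    simpa [pvWc] using this

lemma pv_zipB (ls : List String) (l : String) (wi : Int) :
    (((pvBlank l :: ls.map pvBlank).zip (ls.map pvBlank)).zip (pvPref wi (l :: ls))).filterMap
        (fun t => if t.1.1 && !t.1.2 then some t.2 else none)
      = pvH (pvBlank l) ls (wi + pvWc l) := by
  induction ls generalizing l wi with
  | nil => simp [pvPref, pvH]
  | cons l₂ ls ih =>
    rw [show pvPref wi (l :: l₂ :: ls) = (wi + pvWc l) :: pvPref (wi + pvWc l) (l₂ :: ls) from rfl]
    simp only [List.map_cons, List.zip_cons_cons, List.filterMap_cons]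
    rw [ih l₂ (wi + pvWc l)]
    by_cases hc : pvBlank l && !pvBlank l₂ <;> simp [pvH, hc]

lemma pv_slice_one {α : Type} (xs : List α) :
    PySem.List.slice xs (some 1) none = xs.drop 1 := by
  simpa using PySem.List.slice_from (xs := xs) (a := (1 : Int)) (by norm_num)

-- ===== VERDICT (by name: the statement is the Claim_ definition above) =====
theorem paragraph_start_indices_py_spec : Claim_equal_paragraph_start_indices_py := by
  intro text _
  unfold Spec_paragraph_start_indices_py paragraph_start_indices_py paragraph_start_indices_py_alt
  cases hls : (PySem.Str.split? text "\n").getD [] with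
  | nil => rfl
  | cons l ls =>
    rw [pv_foldA]
    dsimp only
    rw [pv_slice_one, pv_slice_one]
    have hpref := pv_foldPref (l :: ls) [] 0
    rw [List.nil_append] at hpref
    rw [hpref]
    rw [show (fun line => PySem.Str.strip line == "") = pvBlank from rfl]
    simp only [List.map_cons, List.singleton_append, List.drop_succ_cons, List.drop_zero]
    rw [pv_zipB ls l 0]
    simp [pvH]
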